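-- pv_equiv track=rewrite | github.com/Hulyamr13/hackerrank | Hexagonal Grid.py | solve
-- ===== SOURCE A (Python) =====
-- def solve(problem):
--     if not problem:
--         return True
--
--     if len(problem) == 1 and not problem[0]:
--         return False
--     elif len(problem) == 1 and problem[0]:
--         return True
--
--     if problem[0]:
--         return solve(problem[1:])
--     if not problem[0] and not problem[1]:
--         return solve(problem[2:])
--     if not problem[0] and len(problem) > 2 and not problem[2]:
--         return solve(problem[3:])
--
--     return False
-- ===== SOURCE B (Python) =====
-- def solve(problem):
--     i, n = 0, len(problem)
--     while True:
--         remaining = n - i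
--         if remaining == 0:
--             return True
--         if remaining == 1:
--             return True if problem[i] else False
--         if problem[i]:
--             i += 1
--         elif not problem[i + 1]:
--             i += 2
--         elif remaining > 2 and not problem[i + 2]:
--             i += 3
--         else:
--             return False
-- ===== Notes on version B (the rewrite author's own statement) =====
-- stated objective: alternative
-- what changed: Replaced A's tail recursion on list slices by a single while-True loop over an integer index, eliminating the O(n) slice copies made at every step.
import Mathlib
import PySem

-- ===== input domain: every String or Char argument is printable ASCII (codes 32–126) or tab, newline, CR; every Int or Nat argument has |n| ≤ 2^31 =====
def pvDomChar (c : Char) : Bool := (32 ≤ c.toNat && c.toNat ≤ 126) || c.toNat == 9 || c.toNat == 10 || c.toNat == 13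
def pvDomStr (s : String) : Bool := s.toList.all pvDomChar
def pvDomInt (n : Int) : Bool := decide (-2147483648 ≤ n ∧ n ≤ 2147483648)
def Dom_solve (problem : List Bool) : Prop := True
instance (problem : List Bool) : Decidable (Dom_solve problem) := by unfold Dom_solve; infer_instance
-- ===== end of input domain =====

-- B replaces A's tail recursion on list slices by an index loop over the list (alternative decomposition, no slice copies).


-- ===== PORT A =====
-- A recurses on the slices problem[1:], problem[2:], problem[3:]; here those are the structural tails.
def solve (problem : List Bool) : Bool :=
  match problem with
  | [] => true
  | [b] => b                                  -- len==1: False if not problem[0], True if problem[0]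
  | a :: b :: rest =>
      if a then solve (b :: rest)             -- problem[0] → solve(problem[1:])
      else if !b then solve rest              -- not problem[0] and not problem[1] → solve(problem[2:])
      else match rest with
        | c :: rest' => if !c then solve rest' else false   -- len>2 and not problem[2] → solve(problem[3:])
        | [] => false

-- ===== PORT B =====
-- B's while-True loop over index i; the recursion fuel is remaining = n - i, which strictly decreases.
def solveLoop (p : List Bool) (n i : Nat) : Bool :=
  let remaining := n - i
  if remaining = 0 then true
  else if remaining = 1 then p.getD i false
  else if p.getD i false then solveLoop p n (i + 1)
  else if !(p.getD (i + 1) false) then solveLoop p n (i + 2)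
  else if remaining > 2 && !(p.getD (i + 2) false) then solveLoop p n (i + 3)
  else false
termination_by n - i
decreasing_by all_goals omega

def solve_alt (problem : List Bool) : Bool := solveLoop problem problem.length 0

-- ===== PRECONDITION & SPEC =====
def Spec_solve (problem : List Bool) (out : Bool) : Prop := out = solve_alt problem
instance (problem : List Bool) (out : Bool) : Decidable (Spec_solve problem out) := by unfold Spec_solve; infer_instance

-- ===== CLAIM (what is proved, stated in full; the proofs are below) =====
def Claim_equal_solve : Prop := ∀ (problem : List Bool), Dom_solve problem → Spec_solve problem (solve problem)

-- ===== LEMMAS AND PROOFS =====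
theorem solveLoop_eq_solve_drop (p : List Bool) :
    ∀ (k i : Nat), p.length - i ≤ k → solveLoop p p.length i = solve (p.drop i) := by
  intro k
  induction k with
  | zero =>
      intro i h
      have hdrop : p.drop i = [] := List.drop_eq_nil_of_le (by omega)
      rw [solveLoop, hdrop]
      simp [solve]
      omega
  | succ k ih =>
      intro i h
      rw [solveLoop]
      by_cases h0 : p.length - i = 0
      · have hdrop : p.drop i = [] := List.drop_eq_nil_of_le (by omega)
        simp [h0, hdrop, solve]
      · have hi : i < p.length := by omega
        have hd1 : p.drop i = p[i] :: p.drop (i + 1) := List.drop_eq_getElem_cons hi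
        have hg0 : p[i]? = some p[i] := List.getElem?_eq_getElem hi
        by_cases h1 : p.length - i = 1
        · have hdrop1 : p.drop (i + 1) = [] := List.drop_eq_nil_of_le (by omega)
          simp [h1, hd1, hdrop1, List.getD, hg0, solve]
        · -- remaining ≥ 2
          have hi1 : i + 1 < p.length := by omega
          have hd2 : p.drop (i + 1) = p[i+1] :: p.drop (i + 2) := List.drop_eq_getElem_cons hi1
          have hg1 : p[i+1]? = some p[i+1] := List.getElem?_eq_getElem hi1
          simp only [h0, h1, if_false, List.getD, hg0, hg1, Option.getD_some]
          by_cases ha : p[i] = true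
          · -- problem[i] true
            rw [if_pos ha, ih (i + 1) (by omega), hd1, hd2]
            cases hdr : p.drop (i + 2) with
            | nil => simp [solve, ha, hd2, hdr]
            | cons c cs => simp [solve, ha, hd2, hdr]
          · have ha' : p[i] = false := by simpa using ha
            rw [if_neg ha]
            by_cases hb : p[i+1] = true
            · -- problem[i] false, problem[i+1] true
              simp only [hb, Bool.not_true, if_false]
              by_cases h2 : p.length - i > 2
              · have hi2 : i + 2 < p.length := by omega
                have hd3 : p.drop (i + 2) = p[i+2] :: p.drop (i + 3) := List.drop_eq_getElem_cons hi2
                have hg2 : p[i+2]? = some p[i+2] := List.getElem?_eq_getElem hi2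
                simp only [List.getD, hg2, Option.getD_some]
                by_cases hc : p[i+2] = true
                · simp [h2, hc, hd1, hd2, hd3, solve, ha', hb]
                · have hc' : p[i+2] = false := by simpa using hc
                  have : (decide (p.length - i > 2) && !p[i+2]) = true := by
                    simp [h2, hc']
                  rw [this, if_pos rfl, ih (i + 3) (by omega)]
                  simp [hd1, hd2, hd3, solve, ha', hb, hc']
              · -- remaining = 2
                have hdrop2 : p.drop (i + 2) = [] := List.drop_eq_nil_of_le (by omega)
                have : (decide (p.length - i > 2) && !p[i+2]?.getD false) = false := by
                  simp [h2]
                simp only [List.getD, this, if_neg Bool.false_ne_true]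
                simp [hd1, hd2, hdrop2, solve, ha', hb]
            · -- problem[i] false, problem[i+1] false
              have hb' : p[i+1] = false := by simpa using hb
              rw [hb', Bool.not_false, if_pos rfl, ih (i + 2) (by omega), hd1, hd2]
              cases hdr : p.drop (i + 2) with
              | nil => simp [solve, ha', hb', hdr]
              | cons c cs => simp [solve, ha', hb', hdr]

-- ===== VERDICT (by name: the statement is the Claim_ definition above) =====
theorem solve_spec : Claim_equal_solve := by
  intro p _
  unfold Spec_solve solve_alt
  rw [solveLoop_eq_solve_drop p p.length 0 (by omega)]
  simp
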